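-- pv_equiv track=rewrite | github.com/Cloud-Computing-Tutorial/CC-EC2 | source/algorithms/fcfs.py | fcfsMain
-- ===== SOURCE A (Python) =====
-- def fcfsWT(at, n, bt, wt):
--     cur_time=0
--     count=0
--     minm=999999
--     mini=0
--     flag=0
--     completed=[0]*n
--     while count!=n:
--         for i in range(n):
--             if at[i]<=cur_time and completed[i]==0 and at[i]<minm:
--                 minm=at[i]
--                 mini=i
--                 flag=1
--
--         if flag==0:
--             cur_time+=1
--             continue
--
--         wt[mini]=cur_time-at[mini]
--         cur_time+=bt[mini]
--         completed[mini]=1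
--         count+=1
--         flag=0
--         minm=999999
--
-- def fcfsTAT( n,bt, wt, tat):
--     for i in range(n):
--         tat[i] = bt[i] + wt[i]
--
-- def fcfsMain(at,bt,n,result,total_wt,total_tat,compl_time):
--     wt = [0] * n
--     tat = [0] * n
--
--     fcfsWT(at, n, bt, wt)
--
--     fcfsTAT( n,bt, wt, tat)
--
--     for i in range(n):
--         total_wt = total_wt + wt[i]
--         total_tat = total_tat + tat[i]
--         compl_time = tat[i] + at[i]
--         result.append([at[i],bt[i],compl_time,wt[i],tat[i]])
--     return total_wt,total_tat,compl_time
-- ===== SOURCE B (Python) =====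
-- def fcfsMain(at, bt, n, result, total_wt, total_tat, compl_time):
--     # One-pass FCFS: process jobs in (arrival, index) order; the CPU clock jumps
--     # straight to max(clock, arrival) instead of ticking one unit at a time.
--     wt = [0] * n
--     cur = 0
--     for i in sorted(range(n), key=lambda i: (at[i], i)):
--         start = cur if cur > at[i] else at[i]
--         wt[i] = start - at[i]
--         cur = start + bt[i]
--     for i in range(n):
--         t = bt[i] + wt[i]
--         total_wt += wt[i]
--         total_tat += t
--         compl_time = t + at[i]
--         result.append([at[i], bt[i], compl_time, wt[i], t])
--     return total_wt, total_tat, compl_time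
-- ===== Notes on version B (the rewrite author's own statement) =====
-- stated objective: faster
-- what changed: Replaces A's while-loop that rescans all n processes every iteration and advances the clock one time-unit per idle step with a single sort by (arrival, index) and one pass that jumps the clock straight to max(clock, arrival).
import Mathlib
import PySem

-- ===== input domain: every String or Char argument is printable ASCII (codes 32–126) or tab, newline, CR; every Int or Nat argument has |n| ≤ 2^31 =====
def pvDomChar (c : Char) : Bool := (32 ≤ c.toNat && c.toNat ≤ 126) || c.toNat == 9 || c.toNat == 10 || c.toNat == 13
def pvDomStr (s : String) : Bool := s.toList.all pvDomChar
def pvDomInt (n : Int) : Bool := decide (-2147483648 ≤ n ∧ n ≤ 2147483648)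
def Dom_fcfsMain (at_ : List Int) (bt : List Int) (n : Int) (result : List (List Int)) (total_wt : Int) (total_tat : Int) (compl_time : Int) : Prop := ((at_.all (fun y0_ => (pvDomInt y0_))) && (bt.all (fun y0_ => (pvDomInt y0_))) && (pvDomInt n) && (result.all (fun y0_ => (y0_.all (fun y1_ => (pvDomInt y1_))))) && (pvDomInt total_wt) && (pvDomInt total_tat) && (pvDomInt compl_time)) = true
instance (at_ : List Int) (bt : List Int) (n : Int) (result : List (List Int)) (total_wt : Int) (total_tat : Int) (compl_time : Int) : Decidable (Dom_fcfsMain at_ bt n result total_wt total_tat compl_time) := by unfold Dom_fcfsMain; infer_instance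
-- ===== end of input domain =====

-- B replaces A's rescan-everything-and-tick-the-clock-by-1 while-loop with one sort by
-- (arrival, index) and a single pass that jumps the clock to max(clock, arrival).
-- Return-value equivalence only: both Pythons also append the same rows to `result` in place.

-- ===== PORT A =====
-- body of the inner 'for i in range(n)' of fcfsWT; state s = (minm, mini, flag)
def fcfsScanStep (at_ completed : List Int) (cur : Int) (s : Int × Int × Int) (i : Int) : Int × Int × Int :=
  if PySem.List.pyGetD at_ i 0 ≤ cur ∧ PySem.List.pyGetD completed i 0 = 0 ∧
      PySem.List.pyGetD at_ i 0 < s.1 then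
    (PySem.List.pyGetD at_ i 0, i, 1)
  else s

def fcfsScan (at_ completed : List Int) (cur : Int) (n : Int) (s : Int × Int × Int) : Int × Int × Int :=
  (PySem.List.pyRange 0 n 1).foldl (fcfsScanStep at_ completed cur) s

-- the 'while count != n' loop of fcfsWT (fuel only makes the port total; under
-- Pre_ the fuel passed by fcfsMain is proved sufficient)
def fcfsLoop (at_ bt : List Int) (n : Int) :
    Nat → Int → Int × Int × Int → List Int → Nat → List Int → List Int
  | 0, _, _, _, _, wt => wt
  | fuel + 1, cur, s, completed, count, wt =>
    if count = n.toNat then wt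
    else
      let s' := fcfsScan at_ completed cur n s
      if s'.2.2 = 0 then
        fcfsLoop at_ bt n fuel (cur + 1) s' completed count wt
      else
        fcfsLoop at_ bt n fuel (cur + PySem.List.pyGetD bt s'.2.1 0) (999999, s'.2.1, 0)
          (PySem.List.pySetD completed s'.2.1 1) (count + 1)
          (PySem.List.pySetD wt s'.2.1 (cur - PySem.List.pyGetD at_ s'.2.1 0))

def fcfsMain (at_ : List Int) (bt : List Int) (n : Int) (result : List (List Int)) (total_wt : Int) (total_tat : Int) (compl_time : Int) : List Int :=
  let fuel := n.toNat + (PySem.List.pyRange 0 n 1).foldl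
      (fun acc i => acc + ((PySem.List.pyGetD at_ i 0).natAbs + (PySem.List.pyGetD bt i 0).natAbs)) 0 + 1
  let wt := fcfsLoop at_ bt n fuel 0 (999999, 0, 0) (List.replicate n.toNat 0) 0
      (List.replicate n.toNat 0)
  let tat := (PySem.List.pyRange 0 n 1).foldl
      (fun tat i => PySem.List.pySetD tat i (PySem.List.pyGetD bt i 0 + PySem.List.pyGetD wt i 0))
      (List.replicate n.toNat 0)
  let r := (PySem.List.pyRange 0 n 1).foldl
      (fun (t : Int × Int × Int) i =>
        (t.1 + PySem.List.pyGetD wt i 0, t.2.1 + PySem.List.pyGetD tat i 0,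
          PySem.List.pyGetD tat i 0 + PySem.List.pyGetD at_ i 0))
      (total_wt, total_tat, compl_time)
  [r.1, r.2.1, r.2.2]

-- ===== PORT B =====
-- body of Source B's single scheduling pass; p = (wt, cur)
def fcfsAltStep (at_ bt : List Int) (p : List Int × Int) (i : Int) : List Int × Int :=
  let a := PySem.List.pyGetD at_ i 0
  let start := if p.2 > a then p.2 else a
  (PySem.List.pySetD p.1 i (start - a), start + PySem.List.pyGetD bt i 0)

def fcfsMain_alt (at_ : List Int) (bt : List Int) (n : Int) (result : List (List Int)) (total_wt : Int) (total_tat : Int) (compl_time : Int) : List Int :=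
  let order := PySem.List.sorted2 (PySem.List.pyRange 0 n 1)
      (fun i => PySem.List.pyGetD at_ i 0) (fun i => i)
  let wt := (order.foldl (fcfsAltStep at_ bt) (List.replicate n.toNat 0, 0)).1
  let r := (PySem.List.pyRange 0 n 1).foldl
      (fun (t : Int × Int × Int) i =>
        let w := PySem.List.pyGetD wt i 0
        let tt := PySem.List.pyGetD bt i 0 + w
        (t.1 + w, t.2.1 + tt, tt + PySem.List.pyGetD at_ i 0))
      (total_wt, total_tat, compl_time)
  [r.1, r.2.1, r.2.2]

-- ===== PRECONDITION & SPEC =====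
-- Pre_ excludes exactly the inputs on which Python A never returns: n < 0 or an arrival ≥ the
-- sentinel 999999 makes its while-loop spin forever, and n > len(at) or n > len(bt) raises IndexError.
def Pre_fcfsMain (at_ : List Int) (bt : List Int) (n : Int) (result : List (List Int)) (total_wt : Int) (total_tat : Int) (compl_time : Int) : Prop :=
  0 ≤ n ∧ n ≤ (at_.length : Int) ∧ n ≤ (bt.length : Int) ∧ ∀ x ∈ at_.take n.toNat, x < 999999
instance (at_ : List Int) (bt : List Int) (n : Int) (result : List (List Int)) (total_wt : Int) (total_tat : Int) (compl_time : Int) : Decidable (Pre_fcfsMain at_ bt n result total_wt total_tat compl_time) := by unfold Pre_fcfsMain; infer_instance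

def pvWitness_fcfsMain : List Int × List Int × Int × List (List Int) × Int × Int × Int :=
  ([0, 2], [3, 1], 2, [], 0, 0, 0)

def Spec_fcfsMain (at_ : List Int) (bt : List Int) (n : Int) (result : List (List Int)) (total_wt : Int) (total_tat : Int) (compl_time : Int) (out : List Int) : Prop := out = fcfsMain_alt at_ bt n result total_wt total_tat compl_time
instance (at_ : List Int) (bt : List Int) (n : Int) (result : List (List Int)) (total_wt : Int) (total_tat : Int) (compl_time : Int) (out : List Int) : Decidable (Spec_fcfsMain at_ bt n result total_wt total_tat compl_time out) := by unfold Spec_fcfsMain; infer_instance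

-- ===== CLAIM (what is proved, stated in full; the proofs are below) =====
def Claim_equal_fcfsMain : Prop := ∀ (at_ : List Int) (bt : List Int) (n : Int) (result : List (List Int)) (total_wt : Int) (total_tat : Int) (compl_time : Int), Dom_fcfsMain at_ bt n result total_wt total_tat compl_time → Pre_fcfsMain at_ bt n result total_wt total_tat compl_time → Spec_fcfsMain at_ bt n result total_wt total_tat compl_time (fcfsMain at_ bt n result total_wt total_tat compl_time)

-- ===== LEMMAS AND PROOFS =====

-- arrival / burst read, as both ports perform it
def pvA (xs : List Int) (i : Int) : Int := PySem.List.pyGetD xs i 0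

-- the (arrival, index) order B sorts by
def pvLex (at_ : List Int) (i j : Int) : Prop :=
  pvA at_ i < pvA at_ j ∨ (pvA at_ i = pvA at_ j ∧ i < j)

-- fuel actually consumed by A's while-loop on remaining (sorted) processes rs from clock cur
def pvBound (at_ bt : List Int) : List Int → Int → Nat
  | [], _ => 0
  | i :: t, cur =>
    (pvA at_ i - cur).toNat + 1 +
      pvBound at_ bt t ((if cur > pvA at_ i then cur else pvA at_ i) + pvA bt i)

lemma scan_keep (at_ completed : List Int) (cur : Int) :
    ∀ (L : List Int) (s : Int × Int × Int),
      (∀ i ∈ L, ¬(pvA at_ i ≤ cur ∧ PySem.List.pyGetD completed i 0 = 0 ∧ pvA at_ i < s.1)) →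
      L.foldl (fcfsScanStep at_ completed cur) s = s := by
  intro L
  induction L with
  | nil => intro s _; rfl
  | cons x t ih =>
    intro s h
    have hx := h x (by simp)
    simp only [List.foldl_cons]
    rw [show fcfsScanStep at_ completed cur s x = s by
      unfold fcfsScanStep; rw [if_neg]; exact fun hc => hx ⟨hc.1, hc.2.1, hc.2.2⟩]
    exact ih s (fun i hi => h i (by simp [hi]))

lemma scan_lower (at_ completed : List Int) (cur m : Int) :
    ∀ (L : List Int) (s : Int × Int × Int),
      m < s.1 →
      (∀ i ∈ L, pvA at_ i ≤ cur → PySem.List.pyGetD completed i 0 = 0 → m < pvA at_ i) →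
      m < (L.foldl (fcfsScanStep at_ completed cur) s).1 := by
  intro L
  induction L with
  | nil => intro s hs _; exact hs
  | cons x t ih =>
    intro s hs h
    simp only [List.foldl_cons]
    by_cases hc : PySem.List.pyGetD at_ x 0 ≤ cur ∧ PySem.List.pyGetD completed x 0 = 0 ∧
        PySem.List.pyGetD at_ x 0 < s.1
    · rw [show fcfsScanStep at_ completed cur s x = (PySem.List.pyGetD at_ x 0, x, 1) by
        unfold fcfsScanStep; rw [if_pos hc]]
      exact ih _ (h x (by simp) hc.1 hc.2.1) (fun i hi => h i (by simp [hi]))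
    · rw [show fcfsScanStep at_ completed cur s x = s by unfold fcfsScanStep; rw [if_neg hc]]
      exact ih s hs (fun i hi => h i (by simp [hi]))

lemma scan_finds (at_ completed : List Int) (cur n h m0 : Int)
    (hh0 : 0 ≤ h) (hhn : h < n)
    (hA : pvA at_ h ≤ cur) (hc : PySem.List.pyGetD completed h 0 = 0)
    (hsent : pvA at_ h < 999999)
    (hpre : ∀ j, 0 ≤ j → j < h → pvA at_ j ≤ cur → PySem.List.pyGetD completed j 0 = 0 →
      pvA at_ h < pvA at_ j)
    (hpost : ∀ j, h < j → j < n → pvA at_ j ≤ cur → PySem.List.pyGetD completed j 0 = 0 →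
      pvA at_ h ≤ pvA at_ j) :
    fcfsScan at_ completed cur n (999999, m0, 0) = (pvA at_ h, h, 1) := by
  unfold fcfsScan
  rw [PySem.List.pyRange_one_append 0 h n hh0 (le_of_lt hhn), List.foldl_append,
    PySem.List.pyRange_one_cons hhn, List.foldl_cons]
  have h1 : pvA at_ h <
      ((PySem.List.pyRange 0 h 1).foldl (fcfsScanStep at_ completed cur) (999999, m0, 0)).1 := by
    apply scan_lower
    · exact hsent
    · intro j hj hj1 hj2
      have := PySem.List.mem_pyRange_one.mp hj
      exact hpre j this.1 this.2 hj1 hj2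
  set s1 := (PySem.List.pyRange 0 h 1).foldl (fcfsScanStep at_ completed cur) (999999, m0, 0)
  rw [show fcfsScanStep at_ completed cur s1 h = (pvA at_ h, h, 1) by
    unfold fcfsScanStep; rw [if_pos ⟨hA, hc, h1⟩]; rfl]
  apply scan_keep
  intro j hj hcond
  have hm := PySem.List.mem_pyRange_one.mp hj
  have := hpost j (by omega) hm.2 hcond.1 hcond.2.1
  exact absurd hcond.2.2 (by simp only []; omega)


lemma pvBound_le (at_ bt : List Int) :
    ∀ (rs : List Int) (cur : Int),
      pvBound at_ bt rs cur ≤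
        rs.length + (rs.map (fun i => (pvA at_ i).natAbs + (pvA bt i).natAbs)).sum + (-cur).toNat := by
  intro rs
  induction rs with
  | nil => intro cur; simp [pvBound]
  | cons x t ih =>
    intro cur
    have hx := ih ((if cur > pvA at_ x then cur else pvA at_ x) + pvA bt x)
    simp only [pvBound, List.map_cons, List.sum_cons, List.length_cons]
    split_ifs at hx ⊢ <;> omega
lemma setfold_getD (f : Int → Int) :
    ∀ (m : Nat) (L : List Int), m ≤ L.length →
      (((PySem.List.pyRange 0 (m : Int) 1).foldl
          (fun t j => PySem.List.pySetD t j (f j)) L).length = L.length ∧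
       ∀ k : Nat, k < m →
        ((PySem.List.pyRange 0 (m : Int) 1).foldl
          (fun t j => PySem.List.pySetD t j (f j)) L).getD k 0 = f k) := by
  intro m
  induction m with
  | zero => intro L _; simp
  | succ m ih =>
    intro L hm
    have hcast : ((m + 1 : Nat) : Int) = (m : Int) + 1 := by push_cast; ring
    rw [hcast, PySem.List.pyRange_one_succ_right (by positivity), List.foldl_append]
    obtain ⟨hlen, hget⟩ := ih L (by omega)
    set inner := (PySem.List.pyRange 0 (m : Int) 1).foldl
        (fun t j => PySem.List.pySetD t j (f j)) L
    simp only [List.foldl_cons, List.foldl_nil, PySem.List.pySetD_natCast]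
    constructor
    · rw [List.length_set, hlen]
    · intro k hk
      rcases Nat.lt_or_ge k m with hkm | hkm
      · rw [List.getD, List.getElem?_set_ne (by omega)]
        exact hget k hkm
      · have hkeq : k = m := by omega
        subst hkeq
        rw [List.getD, List.getElem?_set_self (by omega)]
        rfl

lemma sorted2_as_sorted (xs : List Int) (k1 : Int → Int) :
    PySem.List.sorted2 xs k1 (fun i => i) false
      = PySem.List.sorted xs (fun i => (toLex (k1 i, i) : Int ×ₗ Int)) false := by
  rw [PySem.List.sorted_eq_foldl_insertBy]
  unfold PySem.List.sorted2
  simp only [if_neg (by decide : ¬ (false = true))]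
  have hb : (fun (a b : Int) => decide (k1 a < k1 b) || !decide (k1 b < k1 a) && decide ((fun i => i) a < (fun i => i) b))
      = (fun a b => decide ((toLex (k1 a, a) : Int ×ₗ Int) < toLex (k1 b, b))) := by
    funext a b
    by_cases h1 : k1 a < k1 b <;> by_cases h2 : k1 b < k1 a <;> by_cases h3 : a < b <;>
      simp [h1, h2, h3, Prod.Lex.lt_iff] <;> omega
  rw [hb]

lemma loop_eq (at_ bt : List Int) (n : Int) :
    ∀ (fuel : Nat) (rs : List Int) (cur : Int) (completed wt : List Int) (m0 : Int),
      rs.Pairwise (pvLex at_) →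
      (∀ i ∈ rs, 0 ≤ i ∧ i < n ∧ pvA at_ i < 999999) →
      completed.length = n.toNat →
      (∀ i : Int, 0 ≤ i → i < n → (PySem.List.pyGetD completed i 0 = 0 ↔ i ∈ rs)) →
      rs.length ≤ n.toNat →
      pvBound at_ bt rs cur ≤ fuel →
      fcfsLoop at_ bt n fuel cur (999999, m0, 0) completed (n.toNat - rs.length) wt
        = (rs.foldl (fcfsAltStep at_ bt) (wt, cur)).1 := by
  intro fuel
  induction fuel with
  | zero =>
    intro rs cur completed wt m0 hpw hmem hlen hc hle hfuel
    match rs, hfuel with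
    | [], _ => simp [fcfsLoop]
    | x :: t, hfuel => simp only [pvBound] at hfuel; omega
  | succ f ih =>
    intro rs cur completed wt m0 hpw hmem hlen hc hle hfuel
    match rs, hpw, hmem, hc, hle, hfuel with
    | [], _, _, _, _, _ => simp [fcfsLoop]
    | h :: t, hpw, hmem, hc, hle, hfuel =>
      obtain ⟨hh0, hhn, hsent⟩ := hmem h (by simp)
      have hcount : n.toNat - (h :: t).length ≠ n.toNat := by
        simp only [List.length_cons] at hle ⊢; omega
      have hnotmem : h ∉ t := by
        intro hmemt
        rcases (List.pairwise_cons.mp hpw).1 h hmemt with hlt | ⟨_, hlt⟩ <;> omega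
      have hch : PySem.List.pyGetD completed h 0 = 0 := (hc h hh0 hhn).mpr (by simp)
      have hlex : ∀ j ∈ t, pvLex at_ h j := (List.pairwise_cons.mp hpw).1
      by_cases hcur : pvA at_ h ≤ cur
      · -- completion step
        have hscan : fcfsScan at_ completed cur n (999999, m0, 0) = (pvA at_ h, h, 1) := by
          refine scan_finds at_ completed cur n h m0 hh0 hhn hcur hch hsent ?_ ?_
          · intro j hj0 hjh hjc hjcomp
            rcases List.mem_cons.mp ((hc j hj0 (by omega)).mp hjcomp) with hjh' | hjt
            · omega
            · rcases hlex j hjt with hlt | ⟨_, hlt⟩ <;> omega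
          · intro j hjh hjn hjc hjcomp
            rcases List.mem_cons.mp ((hc j (by omega) hjn).mp hjcomp) with hjh' | hjt
            · omega
            · rcases hlex j hjt with hlt | ⟨heq, _⟩ <;> omega
        rw [fcfsLoop, if_neg hcount, hscan]
        simp only [show ((pvA at_ h, h, 1) : Int × Int × Int).2.2 = 1 from rfl]
        rw [if_neg (by norm_num)]
        have hstart : (if cur > pvA at_ h then cur else pvA at_ h) = cur := by split_ifs <;> omega
        have hcount2 : n.toNat - (h :: t).length + 1 = n.toNat - t.length := by
          simp only [List.length_cons] at hle ⊢; omega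
        rw [hcount2]
        have := ih t (cur + pvA bt h) (PySem.List.pySetD completed h 1)
            (PySem.List.pySetD wt h (cur - pvA at_ h)) h
            (List.pairwise_cons.mp hpw).2
            (fun i hi => hmem i (by simp [hi]))
            (by rw [PySem.List.length_pySetD]; exact hlen)
            (by
              intro i hi0 hin
              have hcomp : h = ((h.toNat : Nat) : Int) := (Int.toNat_of_nonneg hh0).symm
              have hicomp : i = ((i.toNat : Nat) : Int) := (Int.toNat_of_nonneg hi0).symm
              rw [hcomp, hicomp,
                PySem.List.pyGetD_pySetD_natCast completed h.toNat i.toNat 1 0 (by omega)]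
              by_cases hieq : i.toNat = h.toNat
              · rw [if_pos hieq, ← hicomp]
                have hih : i = h := by omega
                constructor
                · intro hx; exact absurd hx one_ne_zero
                · intro hx; exact absurd (hih ▸ hx) hnotmem
              · rw [if_neg hieq, ← hicomp, hc i hi0 hin, List.mem_cons]
                have hih : i ≠ h := by omega
                constructor
                · rintro (hx | hx)
                  · exact absurd hx hih
                  · exact hx
                · exact Or.inr)
            (by simp only [List.length_cons] at hle; omega)
            (by
              simp only [pvBound, hstart] at hfuel
              omega)
        simp only [pvA] at this
        rw [this]
        simp only [List.foldl_cons]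
        have hstep : fcfsAltStep at_ bt (wt, cur) h
            = (PySem.List.pySetD wt h (cur - pvA at_ h), cur + pvA bt h) := by
          unfold fcfsAltStep
          simp only [show ((wt, cur) : List Int × Int).2 = cur from rfl,
            show ((wt, cur) : List Int × Int).1 = wt from rfl]
          rw [show (if cur > PySem.List.pyGetD at_ h 0 then cur else PySem.List.pyGetD at_ h 0) = cur from hstart]
          rfl
        rw [hstep]
        rfl
      · -- idle step
        push_neg at hcur
        have hscan : fcfsScan at_ completed cur n (999999, m0, 0) = (999999, m0, 0) := by
          apply scan_keep
          intro j hj hcond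
          rcases List.mem_cons.mp ((hc j (PySem.List.mem_pyRange_one.mp hj).1 (PySem.List.mem_pyRange_one.mp hj).2).mp hcond.2.1) with hjh | hjt
          · subst hjh; omega
          · rcases hlex j hjt with hlt | ⟨heq, _⟩ <;> omega
        rw [fcfsLoop, if_neg hcount, hscan]
        rw [if_pos rfl]
        have hifs : (if cur + 1 > pvA at_ h then cur + 1 else pvA at_ h)
            = (if cur > pvA at_ h then cur else pvA at_ h) := by split_ifs <;> omega
        have := ih (h :: t) (cur + 1) completed wt m0 hpw hmem hlen hc hle
            (by
              simp only [pvBound, hifs] at hfuel ⊢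
              omega)
        rw [this]
        simp only [List.foldl_cons]
        have hstep : fcfsAltStep at_ bt (wt, cur + 1) h = fcfsAltStep at_ bt (wt, cur) h := by
          unfold fcfsAltStep
          simp only []
          rw [show (if cur + 1 > PySem.List.pyGetD at_ h 0 then cur + 1 else PySem.List.pyGetD at_ h 0)
              = (if cur > PySem.List.pyGetD at_ h 0 then cur else PySem.List.pyGetD at_ h 0) from hifs]
        rw [hstep]

lemma main_eq (at_ bt : List Int) (n : Int) (result : List (List Int)) (tw tt2 ct : Int)
    (hn0 : 0 ≤ n) (hna : n ≤ (at_.length : Int)) (hnb : n ≤ (bt.length : Int))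
    (htake : ∀ x ∈ at_.take n.toNat, x < 999999) :
    fcfsMain at_ bt n result tw tt2 ct = fcfsMain_alt at_ bt n result tw tt2 ct := by
  obtain ⟨m, rfl⟩ : ∃ m : Nat, n = (m : Int) := ⟨n.toNat, (Int.toNat_of_nonneg hn0).symm⟩
  simp only [Int.toNat_natCast] at htake ⊢
  unfold fcfsMain fcfsMain_alt
  simp only [Int.toNat_natCast]
  set order := PySem.List.sorted2 (PySem.List.pyRange 0 (m : Int) 1)
      (fun i => PySem.List.pyGetD at_ i 0) (fun i => i) with horder
  have hperm : order.Perm (PySem.List.pyRange 0 (m : Int) 1) :=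
    PySem.List.sorted2_perm _ _ _ _
  have hnd : order.Nodup := hperm.nodup_iff.mpr (PySem.List.nodup_pyRange_one 0 _)
  have hpwle : order.Pairwise (fun a b =>
      (toLex (PySem.List.pyGetD at_ a 0, a) : Int ×ₗ Int) ≤ toLex (PySem.List.pyGetD at_ b 0, b)) := by
    rw [horder, sorted2_as_sorted]
    exact PySem.List.sorted_pairwise _ _
  have hpw : order.Pairwise (pvLex at_) := by
    refine (hnd.and hpwle).imp ?_
    rintro a b ⟨hab, hle⟩
    rcases Prod.Lex.le_iff.mp hle with hlt | ⟨heq, hle2⟩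
    · exact Or.inl hlt
    · exact Or.inr ⟨heq, lt_of_le_of_ne hle2 (by simpa using hab)⟩
  have hmem : ∀ i ∈ order, 0 ≤ i ∧ i < (m : Int) ∧ pvA at_ i < 999999 := by
    intro i hi
    have hir := PySem.List.mem_pyRange_one.mp (hperm.mem_iff.mp hi)
    refine ⟨hir.1, hir.2, ?_⟩
    have hilen : i.toNat < at_.length := by omega
    have him : i.toNat < m := by omega
    have : pvA at_ i = at_[i.toNat] := by
      unfold pvA
      exact PySem.List.pyGetD_eq_getElem at_ 0 hir.1 (by exact_mod_cast by omega)
    rw [this]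
    refine htake _ ?_
    rw [show at_[i.toNat] = (at_.take m)[i.toNat]'(by simp; omega) from (List.getElem_take).symm]
    exact List.getElem_mem _
  have hlen0 : (List.replicate m (0 : Int)).length = ((m : Int)).toNat := by simp
  have hc0 : ∀ i : Int, 0 ≤ i → i < (m : Int) →
      (PySem.List.pyGetD (List.replicate m (0 : Int)) i 0 = 0 ↔ i ∈ order) := by
    intro i hi0 hin
    have : PySem.List.pyGetD (List.replicate m (0 : Int)) i 0 = 0 := by
      rw [show i = ((i.toNat : Nat) : Int) from (Int.toNat_of_nonneg hi0).symm,
        PySem.List.pyGetD_natCast]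
      simp [List.getD, show i.toNat < m by omega]
    rw [this]
    simp only [true_iff]
    exact hperm.mem_iff.mpr (PySem.List.mem_pyRange_one.mpr ⟨hi0, hin⟩)
  have hlenord : order.length = m := by
    rw [hperm.length_eq, PySem.List.length_pyRange_one]
    omega
  have hfuel : pvBound at_ bt order 0 ≤
      ((m : Int)).toNat + (PySem.List.pyRange 0 (m : Int) 1).foldl
        (fun acc i => acc + ((PySem.List.pyGetD at_ i 0).natAbs + (PySem.List.pyGetD bt i 0).natAbs)) 0 + 1 := by
    have h1 := pvBound_le at_ bt order 0
    have h2 : ((order.map (fun i => (pvA at_ i).natAbs + (pvA bt i).natAbs)).sum)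
        = (((PySem.List.pyRange 0 (m : Int) 1).map (fun i => (pvA at_ i).natAbs + (pvA bt i).natAbs)).sum) :=
      (hperm.map _).sum_eq
    rw [PySem.List.foldl_add_nat]
    simp only [Int.toNat_natCast]
    unfold pvA at h1 h2
    omega
  have hloop := loop_eq at_ bt (m : Int)
      (((m : Int)).toNat + (PySem.List.pyRange 0 (m : Int) 1).foldl
        (fun acc i => acc + ((PySem.List.pyGetD at_ i 0).natAbs + (PySem.List.pyGetD bt i 0).natAbs)) 0 + 1)
      order 0 (List.replicate m 0) (List.replicate m 0) 0 hpw hmem hlen0 hc0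
      (by rw [hlenord]; simp) hfuel
  rw [hlenord] at hloop
  simp only [Int.toNat_natCast, Nat.sub_self] at hloop
  rw [hloop]
  set wtB := (order.foldl (fcfsAltStep at_ bt) (List.replicate m (0 : Int), 0)).1 with hwtB
  have hset := setfold_getD (fun j => PySem.List.pyGetD bt j 0 + PySem.List.pyGetD wtB j 0) m
      (List.replicate m 0) (by simp)
  set tatA := (PySem.List.pyRange 0 (m : Int) 1).foldl
      (fun tat i => PySem.List.pySetD tat i (PySem.List.pyGetD bt i 0 + PySem.List.pyGetD wtB i 0))
      (List.replicate m 0) with htatA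
  have hR : (PySem.List.pyRange 0 (m : Int) 1).foldl
      (fun (t : Int × Int × Int) i => (t.1 + PySem.List.pyGetD wtB i 0,
        t.2.1 + PySem.List.pyGetD tatA i 0,
        PySem.List.pyGetD tatA i 0 + PySem.List.pyGetD at_ i 0)) (tw, tt2, ct)
      = (PySem.List.pyRange 0 (m : Int) 1).foldl
      (fun (t : Int × Int × Int) i =>
        let w := PySem.List.pyGetD wtB i 0
        let tt := PySem.List.pyGetD bt i 0 + w
        (t.1 + w, t.2.1 + tt, tt + PySem.List.pyGetD at_ i 0)) (tw, tt2, ct) := by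
    apply PySem.List.foldl_congr_mem
    intro acc i hi
    have hir := PySem.List.mem_pyRange_one.mp hi
    have htat : PySem.List.pyGetD tatA i 0 = PySem.List.pyGetD bt i 0 + PySem.List.pyGetD wtB i 0 := by
      rw [htatA, show i = ((i.toNat : Nat) : Int) from (Int.toNat_of_nonneg hir.1).symm,
        PySem.List.pyGetD_natCast]
      exact hset.2 i.toNat (by omega)
    simp only [htat]
  rw [hR]

-- ===== VERDICT (by name: the statement is the Claim_ definition above) =====
theorem fcfsMain_spec : Claim_equal_fcfsMain := by
  intro at_ bt n result total_wt total_tat compl_time _ hpre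
  obtain ⟨hn0, hna, hnb, htake⟩ := hpre
  exact main_eq at_ bt n result total_wt total_tat compl_time hn0 hna hnb htake
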